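-- pv_equiv track=rewrite | github.com/DinanathDash/CSE | SEM_5/Python/Assignment-5/Q19.py | unique_pairs
-- ===== SOURCE A (Python) =====
-- def unique_pairs(words):
--     # Step 1: Filter words that have at least 4 letters
--     valid_words = [word for word in words if len(word) >= 4]
--
--     # Step 2: Initialize an empty set to store the pairs
--     unique_pairs_set = set()
--
--     # Step 3: Compare each pair of valid words
--     for i in range(len(valid_words)):
--         for j in range(i + 1, len(valid_words)):
--             word1, word2 = valid_words[i], valid_words[j]
--
--             # Step 4: Check if the words have no common letters
--             if set(word1).isdisjoint(set(word2)):  # No common letters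
--                 # Step 5: Add the pair in lexicographical order to the set
--                 unique_pairs_set.add(tuple(sorted([word1, word2])))
--
--     return unique_pairs_set
-- ===== SOURCE B (Python) =====
-- def unique_pairs(words):
--     valid = [w for w in words if len(w) >= 4]
--     # Inverted index: letter -> set of positions of valid words containing that letter.
--     index = {}
--     for pos, w in enumerate(valid):
--         for ch in w:
--             index.setdefault(ch, set()).add(pos)
--     result = set()
--     for i, w in enumerate(valid):
--         # Positions of words sharing at least one letter with w, via the index.
--         blocked = set()
--         for ch in w:
--             blocked |= index[ch]
--         # Later positions not blocked are exactly the disjoint partners.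
--         for j in sorted(set(range(i + 1, len(valid))) - blocked):
--             v = valid[j]
--             result.add((w, v) if w < v else (v, w))
--     return result
-- ===== Notes on version B (the rewrite author's own statement) =====
-- stated objective: faster
-- what changed: B replaces A's per-pair letter-set disjointness test by an inverted index built once (letter -> set of positions of valid words containing it): for each word it unions its letters' buckets into a blocked-position set and takes the later partner positions by set difference, so no per-pair set construction/intersection remains.
import Mathlib
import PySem

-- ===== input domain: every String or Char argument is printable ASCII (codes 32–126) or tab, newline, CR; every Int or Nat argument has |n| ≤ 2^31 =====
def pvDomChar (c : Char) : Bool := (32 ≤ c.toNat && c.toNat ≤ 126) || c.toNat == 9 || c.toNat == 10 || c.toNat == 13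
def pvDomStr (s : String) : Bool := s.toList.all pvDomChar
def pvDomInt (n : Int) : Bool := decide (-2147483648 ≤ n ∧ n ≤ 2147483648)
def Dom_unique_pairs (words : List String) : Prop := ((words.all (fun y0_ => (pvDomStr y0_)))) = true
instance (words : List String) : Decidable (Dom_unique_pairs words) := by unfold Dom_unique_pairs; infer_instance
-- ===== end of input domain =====

-- B replaces A's pairwise disjointness testing by an inverted index (letter -> set of word
-- positions): the partners of word i are the later positions NOT blocked by any of i's letters,
-- obtained by set difference; same worst case, measurably faster constants (no per-pair set
-- construction/intersection).

-- ===== PORT A =====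
def unique_pairs (words : List String) : List (String × String) :=
  -- Step 1: Filter words that have at least 4 letters
  let valid_words := words.filter (fun word => decide (4 ≤ PySem.Str.len word))
  -- Step 2: empty set
  let init : PySem.Set (String × String) := PySem.Set.empty
  -- Step 3: compare each pair of valid words
  (PySem.List.pyRange 0 (PySem.List.len valid_words)).foldl (fun ups i =>
    (PySem.List.pyRange (i + 1) (PySem.List.len valid_words)).foldl (fun ups j =>
      let word1 := PySem.List.pyGetD valid_words i ""
      let word2 := PySem.List.pyGetD valid_words j ""
      -- Step 4: no common letters
      if PySem.Set.isdisjoint (PySem.Set.ofList word1.toList) (PySem.Set.ofList word2.toList) then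
        -- Step 5: add the pair in lexicographical order
        PySem.Set.add ups
          ((PySem.List.sorted [word1, word2] (fun w => w)).getD 0 "",
           (PySem.List.sorted [word1, word2] (fun w => w)).getD 1 "")
      else ups) ups) init

-- ===== PORT B =====
def unique_pairs_alt (words : List String) : List (String × String) :=
  let valid := words.filter (fun w => decide (4 ≤ PySem.Str.len w))
  -- inverted index: letter -> set of positions of valid words containing that letter
  -- (index.setdefault(ch, set()).add(pos) sets index[ch] to (index.get(ch, set()) with pos added))
  let index : PySem.Dict Char (PySem.Set Int) :=
    (PySem.List.enumerate valid).foldl (fun d pw =>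
      pw.2.toList.foldl (fun d ch =>
        PySem.Dict.modify d ch PySem.Set.empty (fun s => PySem.Set.add s pw.1)) d)
      PySem.Dict.empty
  (PySem.List.enumerate valid).foldl (fun result iw =>
    -- blocked |= index[ch]; getD is exact here: every ch of iw.2 was keyed in the index pass,
    -- so Python's index[ch] never raises
    let blocked := iw.2.toList.foldl (fun b ch =>
      PySem.Set.union b (PySem.Dict.getD index ch PySem.Set.empty)) PySem.Set.empty
    (PySem.List.sorted
        (PySem.Set.diff
          (PySem.Set.ofList (PySem.List.pyRange (iw.1 + 1) (PySem.List.len valid)))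
          blocked) (fun x => x)).foldl
      (fun result j =>
        let v := PySem.List.pyGetD valid j ""
        PySem.Set.add result (if iw.2 < v then (iw.2, v) else (v, iw.2)))
      result)
    PySem.Set.empty

-- ===== PRECONDITION & SPEC =====
def Spec_unique_pairs (words : List String) (out : List (String × String)) : Prop := out = unique_pairs_alt words
instance (words : List String) (out : List (String × String)) : Decidable (Spec_unique_pairs words out) := by unfold Spec_unique_pairs; infer_instance

-- ===== CLAIM (what is proved, stated in full; the proofs are below) =====
def Claim_equal_unique_pairs : Prop := ∀ (words : List String), Dom_unique_pairs words → Spec_unique_pairs words (unique_pairs words)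

-- ===== LEMMAS AND PROOFS =====


def pvIdxFold (l : List (Int × String)) (d : PySem.Dict Char (PySem.Set Int)) :
    PySem.Dict Char (PySem.Set Int) :=
  l.foldl (fun d pw =>
    pw.2.toList.foldl (fun d ch =>
      PySem.Dict.modify d ch PySem.Set.empty (fun s => PySem.Set.add s pw.1)) d) d

theorem mem_getD_charFold (cs : List Char) (p : Int) (d : PySem.Dict Char (PySem.Set Int))
    (ch : Char) (j : Int) :
    (j ∈ PySem.Dict.getD (cs.foldl (fun d c =>
        PySem.Dict.modify d c PySem.Set.empty (fun s => PySem.Set.add s p)) d) ch PySem.Set.empty)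
      ↔ j ∈ PySem.Dict.getD d ch PySem.Set.empty ∨ (j = p ∧ ch ∈ cs) := by
  induction cs generalizing d with
  | nil => simp
  | cons c cs ih =>
    simp only [List.foldl_cons]
    rw [ih, PySem.Dict.getD_modify]
    by_cases hc : ch = c
    · subst hc
      simp [PySem.Set.mem_add]
      tauto
    · simp [hc]

theorem mem_getD_idxFold (l : List (Int × String)) (d : PySem.Dict Char (PySem.Set Int))
    (ch : Char) (j : Int) :
    (j ∈ PySem.Dict.getD (pvIdxFold l d) ch PySem.Set.empty)
      ↔ j ∈ PySem.Dict.getD d ch PySem.Set.empty ∨ ∃ pw ∈ l, j = pw.1 ∧ ch ∈ pw.2.toList := by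
  induction l generalizing d with
  | nil => simp [pvIdxFold]
  | cons p l ih =>
    simp only [pvIdxFold, List.foldl_cons] at ih ⊢
    rw [ih, mem_getD_charFold]
    simp only [List.mem_cons]
    constructor
    · rintro ((h | ⟨rfl, hc⟩) | ⟨pw, hpw, h⟩)
      · exact Or.inl h
      · exact Or.inr ⟨p, Or.inl rfl, rfl, hc⟩
      · exact Or.inr ⟨pw, Or.inr hpw, h⟩
    · rintro (h | ⟨pw, (rfl | hpw), h⟩)
      · exact Or.inl (Or.inl h)
      · exact Or.inl (Or.inr ⟨h.1, h.2⟩)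
      · exact Or.inr ⟨pw, hpw, h⟩

theorem mem_blockedFold (cs : List Char) (index : PySem.Dict Char (PySem.Set Int))
    (b : PySem.Set Int) (j : Int) :
    (j ∈ cs.foldl (fun b ch =>
        PySem.Set.union b (PySem.Dict.getD index ch PySem.Set.empty)) b)
      ↔ j ∈ b ∨ ∃ c ∈ cs, j ∈ PySem.Dict.getD index c PySem.Set.empty := by
  induction cs generalizing b with
  | nil => simp
  | cons c cs ih =>
    simp only [List.foldl_cons]
    rw [ih, PySem.Set.mem_union]
    simp [List.mem_cons]
    tauto

theorem pair_if_comm (a b : String) :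
    (if b < a then (b, a) else (a, b)) = (if a < b then (a, b) else (b, a)) := by
  by_cases h1 : b < a
  · rw [if_pos h1, if_neg (lt_asymm h1)]
  · by_cases h2 : a < b
    · rw [if_neg h1, if_pos h2]
    · rw [if_neg h1, if_neg h2, le_antisymm (not_lt.mp h1) (not_lt.mp h2)]

theorem sortedDiff_eq (R : List Int) (bl : PySem.Set Int)
    (hnd : R.Nodup) (hp : R.Pairwise (· < ·)) :
    PySem.List.sorted (PySem.Set.diff (PySem.Set.ofList R) bl) (fun x => x)
      = R.filter (fun j => !(PySem.Set.contains bl j)) := by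
  apply PySem.List.sorted_eq_of_perm_of_pairwise_lt
  · apply (List.perm_ext_iff_of_nodup (hnd.filter _)
      (PySem.Set.nodup_diff _ _ (PySem.Set.nodup_ofList R))).mpr
    intro x
    simp [PySem.Set.mem_diff, PySem.Set.mem_ofList, List.mem_filter]
  · exact hp.filter _

theorem pair_of_sorted (a b : String) :
    ((PySem.List.sorted [a, b] (fun w => w)).getD 0 "",
     (PySem.List.sorted [a, b] (fun w => w)).getD 1 "")
      = if b < a then (b, a) else (a, b) := by
  have h : PySem.List.sorted [a, b] (fun w => w) = if b < a then [b, a] else [a, b] := by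
    simp [PySem.List.sorted_eq_foldl_insertBy, PySem.List.insertBy]
  rw [h]; split <;> rfl

theorem inner_eq (vs : List String) (idx : PySem.Dict Char (PySem.Set Int)) (i : Int)
    (hi : 0 ≤ i)
    (hidx : ∀ (ch : Char) (j : Int), (j ∈ PySem.Dict.getD idx ch PySem.Set.empty) ↔
      ∃ k : Nat, ∃ hk : k < vs.length, j = (k : Int) ∧ ch ∈ vs[k].toList)
    (acc : PySem.Set (String × String)) :
    (PySem.List.pyRange (i + 1) (PySem.List.len vs)).foldl (fun ups j =>
      if PySem.Set.isdisjoint (PySem.Set.ofList (PySem.List.pyGetD vs i "").toList)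
          (PySem.Set.ofList (PySem.List.pyGetD vs j "").toList) then
        PySem.Set.add ups
          ((PySem.List.sorted [PySem.List.pyGetD vs i "", PySem.List.pyGetD vs j ""] (fun w => w)).getD 0 "",
           (PySem.List.sorted [PySem.List.pyGetD vs i "", PySem.List.pyGetD vs j ""] (fun w => w)).getD 1 "")
      else ups) acc
    = (PySem.List.sorted
        (PySem.Set.diff (PySem.Set.ofList (PySem.List.pyRange (i + 1) (PySem.List.len vs)))
          ((PySem.List.pyGetD vs i "").toList.foldl (fun b ch =>
            PySem.Set.union b (PySem.Dict.getD idx ch PySem.Set.empty)) PySem.Set.empty))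
        (fun x => x)).foldl
      (fun result j =>
        PySem.Set.add result
          (if PySem.List.pyGetD vs i "" < PySem.List.pyGetD vs j ""
           then (PySem.List.pyGetD vs i "", PySem.List.pyGetD vs j "")
           else (PySem.List.pyGetD vs j "", PySem.List.pyGetD vs i ""))) acc := by
  rw [sortedDiff_eq _ _ (PySem.List.nodup_pyRange_one _ _) (PySem.List.pairwise_lt_pyRange_one _ _),
    ← PySem.List.foldl_if_eq_foldl_filter]
  apply PySem.List.foldl_congr_mem
  intro acc j hj
  obtain ⟨hj1, hj2⟩ := PySem.List.mem_pyRange_one.mp hj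
  have hj0 : 0 ≤ j := by omega
  have hjlen : j < (vs.length : Int) := by
    have := PySem.List.len_eq vs; omega
  have hjn : j.toNat < vs.length := by omega
  have hv : PySem.List.pyGetD vs j "" = vs[j.toNat] :=
    PySem.List.pyGetD_eq_getElem vs "" hj0 hjlen
  -- the blocked set contains j iff the two words share a letter
  have hcond : PySem.Set.isdisjoint (PySem.Set.ofList (PySem.List.pyGetD vs i "").toList)
      (PySem.Set.ofList (PySem.List.pyGetD vs j "").toList)
      = !((PySem.List.pyGetD vs i "").toList.foldl (fun b ch =>
            PySem.Set.union b (PySem.Dict.getD idx ch PySem.Set.empty)) PySem.Set.empty).contains j := by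
    have hbl : (((PySem.List.pyGetD vs i "").toList.foldl (fun b ch =>
        PySem.Set.union b (PySem.Dict.getD idx ch PySem.Set.empty)) PySem.Set.empty).contains j = true)
        ↔ ∃ c ∈ (PySem.List.pyGetD vs i "").toList, c ∈ (PySem.List.pyGetD vs j "").toList := by
      rw [PySem.Set.contains_iff, mem_blockedFold]
      simp only [PySem.Set.empty, List.not_mem_nil, false_or]
      constructor
      · rintro ⟨c, hc, hcj⟩
        obtain ⟨k, hk, hkj, hck⟩ := (hidx c j).mp hcj
        refine ⟨c, hc, ?_⟩
        rw [hv]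
        have hkk : j.toNat = k := by omega
        subst hkk
        exact hck
      · rintro ⟨c, hc, hcv⟩
        refine ⟨c, hc, (hidx c j).mpr ⟨j.toNat, hjn, by omega, by rw [hv] at hcv; exact hcv⟩⟩
    have hdis : (PySem.Set.isdisjoint (PySem.Set.ofList (PySem.List.pyGetD vs i "").toList)
        (PySem.Set.ofList (PySem.List.pyGetD vs j "").toList) = true)
        ↔ ¬ ∃ c ∈ (PySem.List.pyGetD vs i "").toList, c ∈ (PySem.List.pyGetD vs j "").toList := by
      rw [PySem.Set.isdisjoint_iff]
      simp [PySem.Set.mem_ofList]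
    by_cases hm : ∃ c ∈ (PySem.List.pyGetD vs i "").toList, c ∈ (PySem.List.pyGetD vs j "").toList
    · rw [hbl.mpr hm, Bool.not_true]
      rcases Bool.eq_false_or_eq_true (PySem.Set.isdisjoint
          (PySem.Set.ofList (PySem.List.pyGetD vs i "").toList)
          (PySem.Set.ofList (PySem.List.pyGetD vs j "").toList)) with h | h
      · exact absurd hm (hdis.mp h)
      · exact h
    · rw [hdis.mpr hm]
      cases hC : (((PySem.List.pyGetD vs i "").toList.foldl (fun b ch =>
          PySem.Set.union b (PySem.Dict.getD idx ch PySem.Set.empty)) PySem.Set.empty).contains j) with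
      | true => exact absurd (hbl.mp hC) hm
      | false => rfl
  rw [hcond]
  cases ((PySem.List.pyGetD vs i "").toList.foldl (fun b ch =>
      PySem.Set.union b (PySem.Dict.getD idx ch PySem.Set.empty)) PySem.Set.empty).contains j with
  | true => rfl
  | false =>
    simp only [Bool.not_false, if_true]
    rw [pair_of_sorted, pair_if_comm]

-- ===== VERDICT (by name: the statement is the Claim_ definition above) =====
theorem unique_pairs_spec : Claim_equal_unique_pairs := by
  intro words _
  unfold Spec_unique_pairs unique_pairs unique_pairs_alt
  dsimp only
  set vs := words.filter (fun w => decide (4 ≤ PySem.Str.len w)) with hvs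
  set idx := (PySem.List.enumerate vs).foldl (fun d pw =>
      pw.2.toList.foldl (fun d ch =>
        PySem.Dict.modify d ch PySem.Set.empty (fun s => PySem.Set.add s pw.1)) d)
      PySem.Dict.empty with hidxdef
  have hidxeq : idx = pvIdxFold (PySem.List.enumerate vs) PySem.Dict.empty := rfl
  have hidx : ∀ (ch : Char) (j : Int), (j ∈ PySem.Dict.getD idx ch PySem.Set.empty) ↔
      ∃ k : Nat, ∃ hk : k < vs.length, j = (k : Int) ∧ ch ∈ vs[k].toList := by
    intro ch j
    rw [hidxeq, mem_getD_idxFold]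
    simp only [PySem.Dict.getD_empty, PySem.Set.empty, List.not_mem_nil, false_or]
    constructor
    · rintro ⟨pw, hpw, hj, hch⟩
      obtain ⟨k, hk, rfl⟩ := (PySem.List.mem_enumerate_iff vs 0 pw).mp hpw
      exact ⟨k, hk, by simpa using hj, by simpa using hch⟩
    · rintro ⟨k, hk, hj, hch⟩
      exact ⟨((k : Int), vs[k]), (PySem.List.mem_enumerate_iff vs 0 _).mpr ⟨k, hk, by simp⟩, hj, hch⟩
  rw [PySem.List.enumerate_eq_map_pyRange vs "", List.foldl_map]
  apply PySem.List.foldl_congr_mem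
  intro acc i hi
  have hi0 : 0 ≤ i := (PySem.List.mem_pyRange_one.mp hi).1
  exact inner_eq vs idx i hi0 hidx acc
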